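-- pv_equiv track=rewrite | github.com/yyren7/langchain | analysis/quick-fcpr-analysis/app/lib/utility/helper.py | ascii16_to_name
-- ===== SOURCE A (Python) =====
-- def ascii16_to_name(ascii16):
--     name = ''
--     for value in ascii16:
--         # 高位バイトと低位バイトを取り出す
--         high_byte = (value >> 8) & 0xFF
--         low_byte = value & 0xFF
--         # バイトから文字に変換
--         if high_byte > 0:
--             name += chr(high_byte)
--         if low_byte > 0:
--             name += chr(low_byte)
--     return name
-- ===== SOURCE B (Python) =====
-- def ascii16_to_name(ascii16):
--     raw = b''.join((value & 0xFFFF).to_bytes(2, 'big') for value in ascii16)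
--     return raw.translate(None, b'\x00').decode('latin-1')
-- ===== Notes on version B (the rewrite author's own statement) =====
-- stated objective: alternative
-- what changed: B replaces A's per-byte shift/chr/string-concat loop by an encode-then-clean pipeline: each value masked to 16 bits is rendered as its 2-byte big-endian chunk via int.to_bytes, the chunks are joined into one bytes buffer, zero bytes are deleted with bytes.translate, and the result is decoded as latin-1.
import Mathlib
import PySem

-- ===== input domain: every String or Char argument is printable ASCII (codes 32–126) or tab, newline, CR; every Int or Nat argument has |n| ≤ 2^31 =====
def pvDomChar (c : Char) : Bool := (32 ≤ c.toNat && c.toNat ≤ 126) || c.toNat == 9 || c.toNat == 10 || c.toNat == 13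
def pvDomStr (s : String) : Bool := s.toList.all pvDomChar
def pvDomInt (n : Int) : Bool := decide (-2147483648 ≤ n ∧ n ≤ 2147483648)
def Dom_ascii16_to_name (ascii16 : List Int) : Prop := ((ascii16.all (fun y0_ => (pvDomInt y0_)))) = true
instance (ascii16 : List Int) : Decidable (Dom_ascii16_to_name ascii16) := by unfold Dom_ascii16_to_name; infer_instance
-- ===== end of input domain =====

-- B re-expresses the task as encode-then-clean: each value masked to 16 bits is rendered as its 2-byte big-endian chunk (to_bytes), the chunks are joined, zero bytes are deleted with translate and the rest decoded as latin-1 — alternative, library-driven decomposition instead of A's per-byte shift/chr/concat loop.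


-- ===== PORT A =====
def ascii16_to_name (ascii16 : List Int) : String :=
  ascii16.foldl (fun (name : String) (value : Int) =>
    let high_byte := PySem.Int.band (value >>> (8 : Nat)) 255
    let low_byte := PySem.Int.band value 255
    let name := if high_byte > 0 then name.push (Char.ofNat high_byte.toNat) else name
    if low_byte > 0 then name.push (Char.ofNat low_byte.toNat) else name) ""

-- ===== PORT B =====
-- Source B: raw = b''.join((value & 0xFFFF).to_bytes(2, 'big') for value in ascii16);
--       return raw.translate(None, b'\x00').decode('latin-1')
-- hand-ported step for step: for 0 ≤ w < 2^16, w.to_bytes(2,'big') is exactly the byte pair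
-- [w // 256, w % 256]; translate(None, b'\x00') deletes exactly the zero bytes; .decode('latin-1')
-- maps each remaining byte b to chr(b). All three steps are exact on these inputs.
def ascii16_to_name_alt (ascii16 : List Int) : String :=
  let raw := ascii16.flatMap (fun (value : Int) =>
    let w := PySem.Int.band value 65535
    [PySem.Int.floordiv w 256, PySem.Int.mod w 256])
  String.ofList (((raw.filter (fun b => b ≠ 0)).map (fun b => Char.ofNat b.toNat)))

-- ===== PRECONDITION & SPEC =====
def Spec_ascii16_to_name (ascii16 : List Int) (out : String) : Prop := out = ascii16_to_name_alt ascii16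
instance (ascii16 : List Int) (out : String) : Decidable (Spec_ascii16_to_name ascii16 out) := by unfold Spec_ascii16_to_name; infer_instance

-- ===== CLAIM (what is proved, stated in full; the proofs are below) =====
def Claim_equal_ascii16_to_name : Prop := ∀ (ascii16 : List Int), Dom_ascii16_to_name ascii16 → Spec_ascii16_to_name ascii16 (ascii16_to_name ascii16)

-- ===== LEMMAS AND PROOFS =====

theorem bandMask255 (v : Int) : PySem.Int.band v 255 = v % 256 := by
  have h8 : ∀ x : Nat, x &&& 255 = x % 256 := by
    intro x; have := Nat.and_two_pow_sub_one_eq_mod x 8; norm_num at this; exact this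
  unfold PySem.Int.band
  split_ifs with h1 h2 h2
  · have : (255 : Int).toNat = 255 := rfl
    rw [this, h8]; omega
  · norm_num at h2
  · have : (255 : Int).toNat = 255 := rfl
    rw [this, Nat.and_comm, h8]; omega
  · norm_num at h2

theorem bandMask65535 (v : Int) : PySem.Int.band v 65535 = v % 65536 := by
  have h16 : ∀ x : Nat, x &&& 65535 = x % 65536 := by
    intro x; have := Nat.and_two_pow_sub_one_eq_mod x 16; norm_num at this; exact this
  unfold PySem.Int.band
  split_ifs with h1 h2 h2
  · have : (65535 : Int).toNat = 65535 := rfl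
    rw [this, h16]; omega
  · norm_num at h2
  · have : (65535 : Int).toNat = 65535 := rfl
    rw [this, Nat.and_comm, h16]; omega
  · norm_num at h2

-- B's per-value byte pair (big-endian chunk of the 16-bit mask) is A's (high, low) masked pair.
theorem bytes_eq :
    (fun (value : Int) =>
      let w := PySem.Int.band value 65535
      [PySem.Int.floordiv w 256, PySem.Int.mod w 256])
    = (fun (value : Int) =>
      [PySem.Int.band (value >>> (8 : Nat)) 255, PySem.Int.band value 255]) := by
  funext v
  show [PySem.Int.floordiv (PySem.Int.band v 65535) 256, PySem.Int.mod (PySem.Int.band v 65535) 256]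
      = [PySem.Int.band (v >>> (8 : Nat)) 255, PySem.Int.band v 255]
  rw [bandMask65535, bandMask255, Int.shiftRight_eq_div_pow, bandMask255,
      PySem.Int.floordiv_eq_ediv_of_pos (by norm_num), PySem.Int.mod_eq_emod_of_pos (by norm_num)]
  norm_num
  omega

theorem band255_nonneg (a : Int) : 0 ≤ PySem.Int.band a 255 := by
  rw [PySem.Int.band_comm]
  exact PySem.Int.band_nonneg_of_nonneg_left a (by norm_num)

theorem push_eq_append (s : String) (c : Char) : s.push c = s ++ String.ofList [c] := by
  rfl

theorem loopA (l : List Int) (s : String) :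
    l.foldl (fun (name : String) (value : Int) =>
      let high_byte := PySem.Int.band (value >>> (8 : Nat)) 255
      let low_byte := PySem.Int.band value 255
      let name := if high_byte > 0 then name.push (Char.ofNat high_byte.toNat) else name
      if low_byte > 0 then name.push (Char.ofNat low_byte.toNat) else name) s
    = s ++ String.ofList ((((l.flatMap (fun (value : Int) =>
        [PySem.Int.band (value >>> (8 : Nat)) 255, PySem.Int.band value 255])).filter
          (fun b => b ≠ 0)).map (fun b => Char.ofNat b.toNat))) := by
  induction l generalizing s with
  | nil => simp
  | cons v t ih =>
    have hh := band255_nonneg (v >>> (8 : Nat))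
    have hl := band255_nonneg v
    simp only [List.foldl_cons, List.flatMap_cons, List.cons_append, List.filter, ih]
    by_cases h1 : PySem.Int.band (v >>> (8 : Nat)) 255 > 0
    · have e1 : ¬ PySem.Int.band (v >>> (8 : Nat)) 255 = 0 := by omega
      by_cases h2 : PySem.Int.band v 255 > 0
      · have e2 : ¬ PySem.Int.band v 255 = 0 := by omega
        simp [h1, h2, e1, e2, push_eq_append, String.append_assoc, ← String.ofList_append, decide_not]
      · have e2 : PySem.Int.band v 255 = 0 := by omega
        simp [h1, e1, e2, push_eq_append, String.append_assoc, ← String.ofList_append, decide_not]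
    · have e1 : PySem.Int.band (v >>> (8 : Nat)) 255 = 0 := by omega
      by_cases h2 : PySem.Int.band v 255 > 0
      · have e2 : ¬ PySem.Int.band v 255 = 0 := by omega
        simp [h2, e1, e2, push_eq_append, String.append_assoc, ← String.ofList_append, decide_not]
      · have e2 : PySem.Int.band v 255 = 0 := by omega
        simp [e1, e2]

-- ===== VERDICT (by name: the statement is the Claim_ definition above) =====
theorem ascii16_to_name_spec : Claim_equal_ascii16_to_name := by
  intro ascii16 _
  unfold Spec_ascii16_to_name ascii16_to_name ascii16_to_name_alt
  rw [bytes_eq]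
  simpa using loopA ascii16 ""
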